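-- pv_equiv track=rewrite | github.com/chukwupg/password-policy-enforcer | password_enforcer.py | _max_sequential
-- ===== SOURCE A (Python) =====
-- def _max_sequential(pw: str) -> int:
--     # Count longest ascending or descending sequence of letters or digits
--     if not pw: return 0
--     maxseq = 1
--     seq = 1
--     for i in range(1, len(pw)):
--         prev, cur = ord(pw[i-1]), ord(pw[i])
--         if cur - prev == 1 or cur - prev == -1:
--             seq += 1
--             if seq > maxseq: maxseq = seq
--         else:
--             seq = 1
--     return maxseq
-- ===== SOURCE B (Python) =====
-- from itertools import groupby
--
--
-- def _max_sequential(pw: str) -> int: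
--     # Phase 1: boolean adjacency flags; Phase 2: longest run of True via groupby.
--     if not pw:
--         return 0
--     flags = [abs(ord(a) - ord(b)) == 1 for a, b in zip(pw, pw[1:])]
--     longest = max((sum(1 for _ in g) for k, g in groupby(flags) if k), default=0)
--     return longest + 1
-- ===== Notes on version B (the rewrite author's own statement) =====
-- stated objective: alternative
-- what changed: A's single fused accumulator loop (seq/maxseq counters updated per character) is replaced by a two-phase pipeline: build the list of adjacency flags with zip, then take the longest run of True via itertools.groupby and add 1.
import Mathlib
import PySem

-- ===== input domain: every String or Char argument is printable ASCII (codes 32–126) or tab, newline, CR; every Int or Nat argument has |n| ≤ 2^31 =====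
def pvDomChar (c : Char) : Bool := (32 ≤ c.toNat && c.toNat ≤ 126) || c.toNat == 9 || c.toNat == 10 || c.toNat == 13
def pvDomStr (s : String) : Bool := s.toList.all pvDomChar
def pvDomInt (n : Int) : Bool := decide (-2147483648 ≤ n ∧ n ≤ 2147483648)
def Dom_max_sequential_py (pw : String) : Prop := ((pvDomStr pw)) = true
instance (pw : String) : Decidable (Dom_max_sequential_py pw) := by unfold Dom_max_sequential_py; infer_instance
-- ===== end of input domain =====

-- B is a two-phase pipeline (adjacency flags, then longest run via groupby) instead of A's fused
-- accumulator loop; same cost, alternative decomposition.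

-- ===== PORT A =====
-- loop body of A: prev, cur = ord(pw[i-1]), ord(pw[i]); update (maxseq, seq)
def pvStepA (l : List Char) (st : Int × Int) (i : Int) : Int × Int :=
  let prev : Int := ((PySem.List.pyGet? l (i - 1)).getD ' ').toNat
  let cur : Int := ((PySem.List.pyGet? l i).getD ' ').toNat
  if cur - prev = 1 ∨ cur - prev = -1 then
    let seq := st.2 + 1
    (if seq > st.1 then seq else st.1, seq)
  else (st.1, 1)

def max_sequential_py (pw : String) : Int :=
  if pw = "" then 0
  else ((PySem.List.pyRange 1 (PySem.Str.len pw) 1).foldl (pvStepA pw.toList) (1, 1)).1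

-- ===== PORT B =====
-- port of itertools.groupby on the flag list: consecutive equal flags with their run lengths
def pvGroupby : List Bool → List (Bool × Int)
  | [] => []
  | b :: l =>
    match pvGroupby l with
    | [] => [(b, 1)]
    | (c, n) :: t => if b = c then (b, n + 1) :: t else (b, 1) :: (c, n) :: t

def max_sequential_py_alt (pw : String) : Int :=
  if pw = "" then 0
  else
    let flags := (pw.toList.zip pw.toList.tail).map
      (fun p => decide (((p.1.toNat : Int) - (p.2.toNat : Int)).natAbs = 1))
    let longest := (pvGroupby flags).foldr (fun g acc => if g.1 then max g.2 acc else acc) 0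
    longest + 1

-- ===== PRECONDITION & SPEC =====
def Spec_max_sequential_py (pw : String) (out : Int) : Prop := out = max_sequential_py_alt pw
instance (pw : String) (out : Int) : Decidable (Spec_max_sequential_py pw out) := by unfold Spec_max_sequential_py; infer_instance

-- ===== CLAIM (what is proved, stated in full; the proofs are below) =====
def Claim_equal_max_sequential_py : Prop := ∀ (pw : String), Dom_max_sequential_py pw → Spec_max_sequential_py pw (max_sequential_py pw)

-- ===== LEMMAS AND PROOFS =====

-- flag list of a char list (B's phase 1, as a named function for the proofs)
def pvFlags (l : List Char) : List Bool :=
  (l.zip l.tail).map (fun p => decide (((p.1.toNat : Int) - (p.2.toNat : Int)).natAbs = 1))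

-- A's loop body as a function of the flag (not the index)
def pvFoldA (st : Int × Int) (b : Bool) : Int × Int :=
  if b then
    let seq := st.2 + 1
    (if seq > st.1 then seq else st.1, seq)
  else (st.1, 1)

-- maximum over the values the `seq` counter attains
def pvPeaks : Int → List Bool → Int
  | s, [] => s
  | s, true :: l => pvPeaks (s + 1) l
  | s, false :: l => max s (pvPeaks 1 l)

-- length of the leading run of `true`
def pvLead : List Bool → Int
  | true :: l => pvLead l + 1
  | _ => 0

-- B's phase 2 result (longest true-run length, 0 if none)
def pvBest (l : List Bool) : Int :=
  (pvGroupby l).foldr (fun g acc => if g.1 then max g.2 acc else acc) 0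

theorem pvLead_nil : pvLead [] = 0 := rfl
theorem pvLead_false (u : List Bool) : pvLead (false :: u) = 0 := rfl
theorem pvLead_true (u : List Bool) : pvLead (true :: u) = pvLead u + 1 := rfl

theorem pvLead_nonneg (l : List Bool) : 0 ≤ pvLead l := by
  induction l with
  | nil => simp [pvLead_nil]
  | cons b u ih => cases b
                   · simp [pvLead_false]
                   · rw [pvLead_true]; omega

theorem pvFlags_cons_cons (a b : Char) (t : List Char) :
    pvFlags (a :: b :: t)
      = decide (((a.toNat : Int) - (b.toNat : Int)).natAbs = 1) :: pvFlags (b :: t) := rfl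

theorem pvPeaks_ge (l : List Bool) : ∀ s : Int, s ≤ pvPeaks s l := by
  induction l with
  | nil => intro s; simp [pvPeaks]
  | cons b t ih =>
    intro s
    cases b <;> simp only [pvPeaks]
    · omega
    · have := ih (s + 1); omega

theorem pvFoldA_peaks (l : List Bool) :
    ∀ m s : Int, 1 ≤ s → s ≤ m → (l.foldl pvFoldA (m, s)).1 = max m (pvPeaks s l) := by
  induction l with
  | nil => intro m s h1 h2; simp [pvPeaks]; omega
  | cons b t ih =>
    intro m s h1 h2
    cases b
    · simp only [List.foldl_cons, pvFoldA, Bool.false_eq_true, if_false, pvPeaks]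
      rw [ih m 1 (by omega) (by omega)]
      omega
    · simp only [List.foldl_cons, pvFoldA, if_true, pvPeaks]
      have hif : (if s + 1 > m then s + 1 else m) = max m (s + 1) := by omega
      rw [hif, ih (max m (s + 1)) (s + 1) (by omega) (by omega)]
      have := pvPeaks_ge t (s + 1)
      omega

theorem pvBest_nonneg (l : List Bool) : 0 ≤ pvBest l := by
  unfold pvBest
  generalize pvGroupby l = gs
  induction gs with
  | nil => simp
  | cons g t ih =>
    simp only [List.foldr_cons]
    by_cases h : g.1 = true <;> simp [h] <;> omega

-- pvGroupby of a list starting with false starts with a false group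
theorem pvGroupby_false_head (u : List Bool) :
    ∃ n t', pvGroupby (false :: u) = (false, n) :: t' := by
  simp only [pvGroupby]
  rcases pvGroupby u with _ | ⟨⟨c, n⟩, t⟩
  · exact ⟨1, [], rfl⟩
  · cases c
    · exact ⟨n + 1, t, by simp⟩
    · exact ⟨1, (true, n) :: t, by simp⟩

-- the leading true-run of true::t becomes one group of length 1 + pvLead t
theorem pvGroupby_true (t : List Bool) :
    ∃ gs, pvGroupby (true :: t) = (true, 1 + pvLead t) :: gs ∧
      pvGroupby t = (if pvLead t = 0 then gs else (true, pvLead t) :: gs) := by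
  induction t with
  | nil => exact ⟨[], rfl, rfl⟩
  | cons b u ih =>
    cases b
    · refine ⟨pvGroupby (false :: u), ?_, by simp [pvLead_false]⟩
      obtain ⟨n, t', h⟩ := pvGroupby_false_head u
      show (match pvGroupby (false :: u) with
        | [] => [(true, 1)]
        | (c, n) :: t => if true = c then (true, n + 1) :: t else (true, 1) :: (c, n) :: t)
        = (true, 1 + pvLead (false :: u)) :: pvGroupby (false :: u)
      rw [h]; simp [pvLead_false]
    · obtain ⟨gs, h1, h2⟩ := ih
      refine ⟨gs, ?_, ?_⟩
      · show (match pvGroupby (true :: u) with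
          | [] => [(true, 1)]
          | (c, n) :: t => if true = c then (true, n + 1) :: t else (true, 1) :: (c, n) :: t)
          = (true, 1 + pvLead (true :: u)) :: gs
        rw [h1]; simp [pvLead_true]; omega
      · rw [h1, pvLead_true]
        have hn := pvLead_nonneg u
        rw [if_neg (by omega)]
        have : 1 + pvLead u = pvLead u + 1 := by omega
        rw [this]

theorem pvBest_false (t : List Bool) : pvBest (false :: t) = pvBest t := by
  unfold pvBest
  simp only [pvGroupby]
  rcases hg : pvGroupby t with _ | ⟨⟨c, n⟩, t'⟩
  · simp
  · cases c <;> simp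

theorem pvBest_true (t : List Bool) :
    pvBest (true :: t) = max (1 + pvLead t) (pvBest t) := by
  obtain ⟨gs, h1, h2⟩ := pvGroupby_true t
  have hl := pvLead_nonneg t
  unfold pvBest
  rw [h1, h2]
  by_cases h : pvLead t = 0
  · simp [h]
  · rw [if_neg h]
    simp only [List.foldr_cons]
    simp
    omega

theorem pvLead_le_best (t : List Bool) : pvLead t ≤ pvBest t := by
  cases t with
  | nil => simp [pvLead_nil, pvBest, pvGroupby]
  | cons b u =>
    cases b
    · have := pvBest_nonneg (false :: u); rw [pvLead_false]; omega
    · rw [pvBest_true, pvLead_true]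
      omega

theorem pvPeaks_eq_best (l : List Bool) :
    ∀ s : Int, 1 ≤ s → pvPeaks s l = max (s + pvLead l) (1 + pvBest l) := by
  induction l with
  | nil =>
    intro s hs
    simp [pvPeaks, pvLead_nil, pvBest, pvGroupby]; omega
  | cons b t ih =>
    intro s hs
    cases b
    · simp only [pvPeaks, pvBest_false, pvLead_false]
      rw [ih 1 (by omega)]
      have h1 := pvLead_le_best t
      omega
    · simp only [pvPeaks, pvLead_true]
      rw [ih (s + 1) (by omega), pvBest_true]
      omega

-- A's indexed loop over range(1, len) equals the flag-driven fold (B's phase split)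
theorem pvBridge (l : List Char) : ∀ (k : Nat) (j : Nat) (st : Int × Int), l.length - j ≤ k →
    (PySem.List.pyRange ((j : Int) + 1) ((l.length : Int)) 1).foldl (pvStepA l) st
      = (pvFlags (l.drop j)).foldl pvFoldA st := by
  intro k
  induction k with
  | zero =>
    intro j st h
    rw [PySem.List.pyRange_one_eq_nil (by omega)]
    have : l.drop j = [] := List.drop_eq_nil_of_le (by omega)
    simp [this, pvFlags]
  | succ k ih =>
    intro j st h
    by_cases hj : j + 1 < l.length
    · rw [PySem.List.pyRange_one_cons (by omega)]
      have hjl : j < l.length := by omega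
      have hdrop : l.drop j = l[j] :: l.drop (j + 1) := List.drop_eq_getElem_cons hjl
      have hdrop2 : l.drop (j + 1) = l[j + 1] :: l.drop (j + 2) := List.drop_eq_getElem_cons hj
      rw [List.foldl_cons, hdrop, hdrop2, pvFlags_cons_cons, List.foldl_cons, ← hdrop2]
      have hstep : pvStepA l st ((j : Int) + 1)
          = pvFoldA st (decide ((((l[j]).toNat : Int) - ((l[j+1]).toNat : Int)).natAbs = 1)) := by
        unfold pvStepA pvFoldA
        have e1 : (j : Int) + 1 - 1 = ((j : Nat) : Int) := by omega
        have e2 : (j : Int) + 1 = (((j + 1 : Nat)) : Int) := by push_cast; ring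
        rw [e1, e2, PySem.List.pyGet?_natCast, PySem.List.pyGet?_natCast,
          List.getElem?_eq_getElem hjl, List.getElem?_eq_getElem hj]
        simp only [Option.getD_some]
        by_cases hc : ((l[j+1]).toNat : Int) - ((l[j]).toNat : Int) = 1 ∨
            ((l[j+1]).toNat : Int) - ((l[j]).toNat : Int) = -1
        · have hd : (decide ((((l[j]).toNat : Int) - ((l[j+1]).toNat : Int)).natAbs = 1)) = true := by
            simp; omega
          rw [if_pos hc, hd]
          simp
        · have hd : (decide ((((l[j]).toNat : Int) - ((l[j+1]).toNat : Int)).natAbs = 1)) = false := by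
            simp; omega
          rw [if_neg hc, hd]
          simp
      rw [hstep]
      have e3 : (j : Int) + 1 + 1 = (((j + 1 : Nat)) : Int) + 1 := by push_cast; ring
      rw [e3, ih (j + 1) _ (by omega)]
    · rw [PySem.List.pyRange_one_eq_nil (by omega)]
      have : pvFlags (l.drop j) = [] := by
        have hlen : (l.drop j).length ≤ 1 := by simp; omega
        rcases hd : l.drop j with _ | ⟨a, _ | ⟨b, u⟩⟩
        · rfl
        · rfl
        · rw [hd] at hlen; simp at hlen
      simp [this]

-- ===== VERDICT (by name: the statement is the Claim_ definition above) =====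
theorem max_sequential_py_spec : Claim_equal_max_sequential_py := by
  intro pw _
  unfold Spec_max_sequential_py max_sequential_py max_sequential_py_alt
  by_cases h : pw = ""
  · simp [h]
  · rw [if_neg h, if_neg h]
    have hne : pw.toList ≠ [] := by
      intro hc; exact h (by rwa [← String.toList_eq_nil_iff])
    have hpos : 0 < pw.toList.length := List.length_pos_of_ne_nil hne
    have hb := pvBridge pw.toList pw.toList.length 0 (1, 1) (by omega)
    have e : ((0 : Nat) : Int) + 1 = 1 := by norm_num
    rw [e, List.drop_zero] at hb
    have hlen : PySem.Str.len pw = (pw.toList.length : Int) := by simp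
    rw [hlen, hb]
    show (List.foldl pvFoldA (1, 1) (pvFlags pw.toList)).1 = pvBest (pvFlags pw.toList) + 1
    rw [pvFoldA_peaks (pvFlags pw.toList) 1 1 (by omega) (by omega)]
    rw [pvPeaks_eq_best (pvFlags pw.toList) 1 (by omega)]
    have h2 := pvLead_le_best (pvFlags pw.toList)
    have h3 := pvBest_nonneg (pvFlags pw.toList)
    omega
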